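-- pv_equiv track=rewrite | github.com/hamzeiehsan/spatial-question-parser | visualization.py | generate_ngrams_of_codes
-- ===== SOURCE A (Python) =====
-- def generate_ngrams_of_codes(encoding_string, max_length):
--     res_dict = dict()
--     for k in range(1, max_length):
--         if k < len(encoding_string):
--             k_grams = [encoding_string[i:i + k] for i in range(len(encoding_string) - k + 1)]
--             for k_gram in k_grams:
--                 if k_gram not in res_dict.keys():
--                     res_dict[k_gram] = {'frequency': 0, 'occurred': 1}
--                 res_dict[k_gram]['frequency'] = res_dict[k_gram]['frequency'] + 1
--     return res_dict
-- ===== SOURCE B (Python) =====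
-- def generate_ngrams_of_codes(encoding_string, max_length):
--     # One pass over start positions: grow each suffix's prefix character by
--     # character, counting every gram as it appears; then rebuild the dict in
--     # length order with a stable sort (ties keep first-appearance order).
--     n = len(encoding_string)
--     limit = max(min(max_length, n), 1)
--     counts = {}
--     for i in range(n):
--         g = ''
--         for c in encoding_string[i:i + limit - 1]:
--             g += c
--             counts[g] = counts.get(g, 0) + 1
--     return {g: {'frequency': c, 'occurred': 1}
--             for g, c in sorted(counts.items(), key=lambda kv: len(kv[0]))}
-- ===== Notes on version B (the rewrite author's own statement) =====
-- stated objective: alternative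
-- what changed: A loops over gram lengths and slides a window of each length, checking membership and incrementing a nested record in one interleaved dict; B transposes the traversal - one pass over start positions growing each suffix's prefix character by character into a flat counter - and then rebuilds the result dict by a stable sort of the counted grams on length (ties keep first-appearance order, which reproduces A's insertion order).
import Mathlib
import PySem

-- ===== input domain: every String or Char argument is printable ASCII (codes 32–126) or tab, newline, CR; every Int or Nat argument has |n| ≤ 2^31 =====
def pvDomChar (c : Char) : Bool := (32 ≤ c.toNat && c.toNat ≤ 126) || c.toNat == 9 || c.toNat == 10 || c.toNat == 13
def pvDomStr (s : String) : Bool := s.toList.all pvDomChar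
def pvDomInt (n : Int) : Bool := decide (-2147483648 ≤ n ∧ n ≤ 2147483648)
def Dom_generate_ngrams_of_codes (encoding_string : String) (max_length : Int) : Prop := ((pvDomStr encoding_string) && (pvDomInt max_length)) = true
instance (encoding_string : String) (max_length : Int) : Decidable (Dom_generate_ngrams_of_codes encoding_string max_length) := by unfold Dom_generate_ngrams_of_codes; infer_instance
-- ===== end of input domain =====

-- B transposes A's traversal (one pass over start positions growing each suffix's
-- prefix into a flat counter, then a stable sort on gram length rebuilds the dict);
-- objective: alternative (same asymptotic cost).

-- ===== PORT A =====
def generate_ngrams_of_codes (encoding_string : String) (max_length : Int) : List (String × List (String × Int)) :=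
  let s := encoding_string.toList
  let res_dict : PySem.Dict (List Char) (PySem.Dict String Int) :=
    (PySem.List.pyRange 1 max_length 1).foldl (fun res_dict k =>
      if k < (s.length : Int) then
        let k_grams := (PySem.List.pyRange 0 ((s.length : Int) - k + 1) 1).map
          (fun i => PySem.List.slice s (some i) (some (i + k)))
        k_grams.foldl (fun rd k_gram =>
          let rd := if rd.contains k_gram = false then
              rd.insert k_gram ⟨[("frequency", 0), ("occurred", 1)]⟩
            else rd
          rd.modify k_gram PySem.Dict.empty
            (fun inner => inner.insert "frequency" (inner.getD "frequency" 0 + 1))) res_dict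
      else res_dict) PySem.Dict.empty
  res_dict.items.map (fun p => (String.ofList p.1, p.2.items))

-- ===== PORT B =====
def generate_ngrams_of_codes_alt (encoding_string : String) (max_length : Int) : List (String × List (String × Int)) :=
  let s := encoding_string.toList
  let n := (s.length : Int)
  let limit := max (min max_length n) 1
  let counts : PySem.Dict (List Char) Int :=
    (PySem.List.pyRange 0 n 1).foldl (fun counts i =>
      ((PySem.List.slice s (some i) (some (i + limit - 1))).foldl
        (fun (p : PySem.Dict (List Char) Int × List Char) c =>
          let g := p.2 ++ [c]
          (p.1.insert g (p.1.getD g 0 + 1), g)) (counts, [])).1) PySem.Dict.empty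
  (PySem.List.sorted counts.items (fun kv => (kv.1.length : Int))).map
    (fun p => (String.ofList p.1, [("frequency", p.2), ("occurred", 1)]))

-- ===== PRECONDITION & SPEC =====
def Spec_generate_ngrams_of_codes (encoding_string : String) (max_length : Int) (out : List (String × List (String × Int))) : Prop := out = generate_ngrams_of_codes_alt encoding_string max_length
instance (encoding_string : String) (max_length : Int) (out : List (String × List (String × Int))) : Decidable (Spec_generate_ngrams_of_codes encoding_string max_length out) := by unfold Spec_generate_ngrams_of_codes; infer_instance

-- ===== CLAIM (what is proved, stated in full; the proofs are below) =====
def Claim_equal_generate_ngrams_of_codes : Prop := ∀ (encoding_string : String) (max_length : Int), Dom_generate_ngrams_of_codes encoding_string max_length → Spec_generate_ngrams_of_codes encoding_string max_length (generate_ngrams_of_codes encoding_string max_length)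

-- ===== LEMMAS AND PROOFS =====

-- the record A keeps per gram, as a function of the count B keeps per gram
def pvRec (v : Int) : PySem.Dict String Int := ⟨[("frequency", v), ("occurred", 1)]⟩

-- A's dict is a gram counter with every count wrapped in the record
def pvWrap (c : PySem.Dict (List Char) Int) : PySem.Dict (List Char) (PySem.Dict String Int) :=
  ⟨c.items.map (fun p => (p.1, pvRec p.2))⟩

-- A's per-gram step and the plain counter step, abstracted over the gram
def pvStepA (d : PySem.Dict (List Char) (PySem.Dict String Int)) (g : List Char) :
    PySem.Dict (List Char) (PySem.Dict String Int) :=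
  let d := if d.contains g = false then d.insert g ⟨[("frequency", 0), ("occurred", 1)]⟩ else d
  d.modify g PySem.Dict.empty (fun inner => inner.insert "frequency" (inner.getD "frequency" 0 + 1))

def pvStepB (c : PySem.Dict (List Char) Int) (g : List Char) : PySem.Dict (List Char) Int :=
  c.insert g (c.getD g 0 + 1)

-- canonical gram lists: row-major (A's order) and column-major (B's order)
def pvRow (s : List Char) (k : Nat) : List (List Char) :=
  (List.range (s.length - k + 1)).map (fun i => (s.drop i).take k)

def pvGsA (s : List Char) (M : Nat) : List (List Char) :=
  (List.range (M - 1)).flatMap (fun j => pvRow s (j + 1))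

def pvCol (s : List Char) (M i : Nat) : List (List Char) :=
  (List.range (min (M - 1) (s.length - i))).map (fun t => (s.drop i).take (t + 1))

def pvGsB (s : List Char) (M : Nat) : List (List Char) :=
  (List.range s.length).flatMap (pvCol s M)

theorem pvRec_bump (w : PySem.Dict String Int) (v : Int) (h : w = pvRec v) :
    w.insert "frequency" (w.getD "frequency" 0 + 1) = pvRec (v + 1) := by
  subst h
  simp [pvRec, PySem.Dict.insert, PySem.Dict.contains, PySem.Dict.getD, PySem.Dict.get?]

theorem pvWrap_contains (c : PySem.Dict (List Char) Int) (g : List Char) :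
    (pvWrap c).contains g = c.contains g := by
  simp [pvWrap, PySem.Dict.contains, List.any_map, Function.comp_def]

theorem pvWrap_insert (c : PySem.Dict (List Char) Int) (g : List Char) (v : Int) :
    (pvWrap c).insert g (pvRec v) = pvWrap (c.insert g v) := by
  unfold PySem.Dict.insert
  by_cases h : c.contains g = true
  · rw [if_pos (by simp [pvWrap_contains, h]), if_pos h]
    simp only [pvWrap, List.map_map]
    refine congrArg _ (List.map_congr_left ?_)
    intro p _
    by_cases hp : p.1 = g <;> simp [hp]
  · have h0 : c.contains g = false := by simpa using h
    rw [if_neg (by simp [pvWrap_contains, h0]), if_neg (by simp [h0])]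
    simp [pvWrap]

theorem pvStep_comm (c : PySem.Dict (List Char) Int) (g : List Char) :
    pvStepA (pvWrap c) g = pvWrap (pvStepB c g) := by
  simp only [pvStepA, pvStepB]
  unfold PySem.Dict.modify
  by_cases h : c.contains g = true
  · obtain ⟨p0, hp0⟩ : ∃ p0, c.items.find? (fun p => p.1 == g) = some p0 := by
      have : (c.items.find? (fun p => p.1 == g)).isSome := by
        rw [List.find?_isSome]
        simpa [PySem.Dict.contains, List.any_eq_true] using h
      exact Option.isSome_iff_exists.mp this
    have hgetB : c.getD g 0 = p0.2 := by
      simp [PySem.Dict.getD, PySem.Dict.get?, hp0]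
    have hgetA : (pvWrap c).getD g PySem.Dict.empty = pvRec p0.2 := by
      simp [pvWrap, PySem.Dict.getD, PySem.Dict.get?, List.find?_map, Function.comp_def, hp0]
    rw [if_neg (by simp [pvWrap_contains, h])]
    simp only [hgetA, pvRec_bump (pvRec p0.2) p0.2 rfl, hgetB]
    exact pvWrap_insert c g (p0.2 + 1)
  · have h0 : c.contains g = false := by simpa using h
    have hgetB : c.getD g 0 = 0 := by
      rw [PySem.Dict.getD_of_not_contains]
      exact h0
    rw [if_pos (by simp [pvWrap_contains, h0]), PySem.Dict.insert_insert_self,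
        PySem.Dict.getD_insert_self]
    have : (⟨[("frequency", 0), ("occurred", 1)]⟩ : PySem.Dict String Int) = pvRec 0 := rfl
    rw [this]
    simp only [pvRec_bump (pvRec 0) 0 rfl, hgetB]
    exact pvWrap_insert c g (0 + 1)

theorem pvFold_comm (gs : List (List Char)) (c : PySem.Dict (List Char) Int) :
    gs.foldl pvStepA (pvWrap c) = pvWrap (gs.foldl pvStepB c) := by
  induction gs generalizing c with
  | nil => rfl
  | cons g gs ih => simp only [List.foldl_cons, pvStep_comm]; exact ih _

theorem pvOuter (s : List Char) (max_length a : Int) (c : PySem.Dict (List Char) Int) :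
    (PySem.List.pyRange a max_length 1).foldl (fun d k =>
      if k < (s.length : Int) then
        ((PySem.List.pyRange 0 ((s.length : Int) - k + 1) 1).map
          (fun i => PySem.List.slice s (some i) (some (i + k)))).foldl pvStepA d
      else d) (pvWrap c)
    = pvWrap ((PySem.List.pyRange a (min max_length (s.length : Int)) 1).foldl (fun c k =>
        (PySem.List.pyRange 0 ((s.length : Int) - k + 1) 1).foldl (fun c i =>
          pvStepB c (PySem.List.slice s (some i) (some (i + k)))) c) c) := by
  induction hn : (max_length - a).toNat generalizing a c with
  | zero =>
    have ha : max_length ≤ a := by omega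
    rw [PySem.List.pyRange_one_eq_nil ha,
        PySem.List.pyRange_one_eq_nil (le_trans (min_le_left _ _) ha)]
    rfl
  | succ n ih =>
    have ha : a < max_length := by omega
    rw [PySem.List.pyRange_one_cons ha, List.foldl_cons]
    by_cases hlen : a < (s.length : Int)
    · rw [if_pos hlen]
      rw [PySem.List.pyRange_one_cons (lt_min ha hlen), List.foldl_cons]
      rw [pvFold_comm]
      rw [List.foldl_map]
      exact ih (a+1) _ (by omega)
    · rw [if_neg hlen]
      have hm : min max_length (s.length : Int) ≤ a := le_trans (min_le_right _ _) (by omega)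
      rw [PySem.List.pyRange_one_eq_nil hm, List.foldl_nil]
      have := ih (a + 1) c (by omega)
      rwa [PySem.List.pyRange_one_eq_nil (le_trans (min_le_right _ _) (by omega)),
           List.foldl_nil] at this

-- pyRange with step 1 as a mapped List.range
theorem pv_pyRange_eq_map (a b : Int) :
    PySem.List.pyRange a b 1 = (List.range (b - a).toNat).map (fun j : Nat => a + (j : Int)) := by
  induction hn : (b - a).toNat generalizing b with
  | zero =>
    rw [PySem.List.pyRange_one_eq_nil (by omega)]
    simp
  | succ n ih =>
    have hb : b = (b - 1) + 1 := by ring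
    rw [hb, PySem.List.pyRange_one_succ_right (by omega), ih (b - 1) (by omega),
        List.range_succ, List.map_append]
    have : b - 1 = a + (n : Int) := by omega
    simp [this]

-- the inner character loop of B builds the prefixes one at a time
theorem pv_foldl_inner (cs : List Char) (st : PySem.Dict (List Char) Int) (g0 : List Char) :
    (cs.foldl (fun (p : PySem.Dict (List Char) Int × List Char) c =>
        (p.1.insert (p.2 ++ [c]) (p.1.getD (p.2 ++ [c]) 0 + 1), p.2 ++ [c])) (st, g0))
    = (((List.range cs.length).map (fun t => g0 ++ cs.take (t + 1))).foldl pvStepB st,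
        g0 ++ cs) := by
  induction cs generalizing st g0 with
  | nil => simp
  | cons c cs ih =>
    rw [List.foldl_cons, ih, List.length_cons, List.range_succ_eq_map]
    simp only [List.map_cons, List.map_map, Function.comp_def, List.take_succ_cons,
      List.take_zero, List.foldl_cons, List.append_assoc,
      List.cons_append]
    rfl

theorem pv_filter_flatMap {α β : Type} (l : List α) (f : α → List β) (p : β → Bool) :
    (l.flatMap f).filter p = l.flatMap (fun x => (f x).filter p) := by
  induction l with
  | nil => rfl
  | cons x l ih => simp [List.flatMap_cons, List.filter_append, ih]

theorem pv_flatMap_congr {α β : Type} {l : List α} {f g : α → List β}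
    (h : ∀ a ∈ l, f a = g a) : l.flatMap f = l.flatMap g := by
  induction l with
  | nil => rfl
  | cons a l ih =>
    simp only [List.flatMap_cons, h a (by simp), ih (fun a ha => h a (by simp [ha]))]

theorem pv_flatMap_single {β : Type} (m j0 : Nat) (G : Nat → List β) :
    (List.range m).flatMap (fun j => if j = j0 then G j else []) =
      if j0 < m then G j0 else [] := by
  induction m with
  | zero => simp
  | succ m ih =>
    rw [List.range_succ, List.flatMap_append, ih]
    by_cases h : j0 < m
    · have h2 : ¬ m = j0 := by omega
      have h3 : j0 < m + 1 := by omega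
      simp [h, h2, h3]
    · by_cases h2 : m = j0
      · subst h2
        have h3 : m < m + 1 := by omega
        simp [h3]
      · have h3 : ¬ j0 < m + 1 := by omega
        simp [h, h2, h3]

theorem pv_flatMap_if_lt {β : Type} (n m : Nat) (f : Nat → β) :
    (List.range n).flatMap (fun i => if i < m then [f i] else []) =
      (List.range (min m n)).map f := by
  induction n with
  | zero => simp
  | succ n ih =>
    rw [List.range_succ, List.flatMap_append, ih]
    by_cases h : n < m
    · have h1 : min m (n + 1) = n + 1 := by omega
      have h2 : min m n = n := by omega
      simp [h, h2, List.range_succ]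
    · have h1 : min m (n + 1) = min m n := by omega
      simp [h, h1]

theorem pv_foldl_add_append {α : Type} [BEq α] [LawfulBEq α]
    (ys A : List α) (h : ∀ y ∈ ys, y ∉ A) : ∀ B : List α,
    ys.foldl PySem.Set.add (A ++ B) = A ++ ys.foldl PySem.Set.add B := by
  induction ys with
  | nil => intro B; rfl
  | cons y ys ih =>
    intro B
    have hy : y ∉ A := h y (by simp)
    have hstep : PySem.Set.add (A ++ B) y = A ++ PySem.Set.add B y := by
      simp only [PySem.Set.add, PySem.Set.contains, List.contains_append]
      have : A.contains y = false := by simpa using hy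
      simp only [this, Bool.false_or]
      split_ifs <;> simp_all [List.append_assoc]
    rw [List.foldl_cons, hstep, List.foldl_cons,
        ih (fun z hz => h z (by simp [hz])) (PySem.Set.add B y)]

theorem pv_ofList_append_disjoint {α : Type} [BEq α] [LawfulBEq α]
    (xs ys : List α) (h : ∀ y ∈ ys, y ∉ xs) :
    PySem.Set.ofList (xs ++ ys) = PySem.Set.ofList xs ++ PySem.Set.ofList ys := by
  have h' : ∀ y ∈ ys, y ∉ PySem.Set.ofList xs := by
    intro y hy
    rw [PySem.Set.mem_ofList]
    exact h y hy
  calc PySem.Set.ofList (xs ++ ys) = ys.foldl PySem.Set.add (PySem.Set.ofList xs ++ []) := by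
        rw [PySem.Set.ofList_eq_foldl, List.foldl_append, ← PySem.Set.ofList_eq_foldl]
        simp
    _ = PySem.Set.ofList xs ++ ys.foldl PySem.Set.add [] := pv_foldl_add_append ys _ h' []
    _ = PySem.Set.ofList xs ++ PySem.Set.ofList ys := by rw [← PySem.Set.ofList_eq_foldl]

theorem pv_ofList_filter {α : Type} [BEq α] [LawfulBEq α] (l : List α) (p : α → Bool) :
    PySem.Set.ofList (l.filter p) = (PySem.Set.ofList l).filter p := by
  induction l using List.reverseRecOn with
  | nil => rfl
  | append_singleton l x ih =>
    have hofl : ∀ (m : List α), PySem.Set.ofList (m ++ [x]) = PySem.Set.add (PySem.Set.ofList m) x := by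
      intro m
      rw [PySem.Set.ofList_eq_foldl, List.foldl_append, ← PySem.Set.ofList_eq_foldl]
      rfl
    rw [List.filter_append, List.filter_cons, List.filter_nil]
    by_cases hp : p x = true
    · simp only [hp, if_true]
      rw [hofl, hofl, ih]
      have hmf : x ∈ (PySem.Set.ofList l).filter p ↔ x ∈ PySem.Set.ofList l := by
        simp [List.mem_filter, hp]
      simp only [PySem.Set.add, PySem.Set.contains, List.contains_eq_mem, decide_eq_true_eq]
      by_cases hx : x ∈ PySem.Set.ofList l
      · simp [hx, hmf.mpr hx]
      · have : ¬ x ∈ (PySem.Set.ofList l).filter p := fun hc => hx (hmf.mp hc)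
        simp [hx, this, List.filter_append, hp]
    · have hp' : p x = false := by simpa using hp
      simp only [hp', Bool.false_eq_true, if_false, List.append_nil]
      rw [hofl, ih]
      simp only [PySem.Set.add, PySem.Set.contains, List.contains_eq_mem, decide_eq_true_eq]
      by_cases hx : x ∈ PySem.Set.ofList l
      · simp [hx]
      · simp [hx, List.filter_append, hp']

theorem pv_insertBy_append {α : Type} (before : α → α → Bool) (x : α) (P S : List α)
    (h : ∀ y ∈ P, before x y = false) :
    PySem.List.insertBy before x (P ++ S) = P ++ PySem.List.insertBy before x S := by
  induction P with
  | nil => rfl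
  | cons y P ih =>
    have hy := h y (by simp)
    simp only [List.cons_append, PySem.List.insertBy, hy]
    simp only [Bool.false_eq_true, if_false]
    rw [ih (fun z hz => h z (by simp [hz]))]

theorem pv_insertBy_cons {α : Type} (before : α → α → Bool) (x y : α) (ys : List α)
    (h : before x y = true) :
    PySem.List.insertBy before x (y :: ys) = x :: y :: ys := by
  simp [PySem.List.insertBy, h]

-- the stable sort of a list whose keys all lie in a strictly increasing value list
-- is the concatenation of its key classes
theorem pv_sorted_blocks {α : Type} (key : α → Int) (xs : List α) (vs : List Int)
    (hvs : vs.Pairwise (· < ·)) (hmem : ∀ a ∈ xs, key a ∈ vs) :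
    PySem.List.sorted xs key = vs.flatMap (fun v => xs.filter (fun a => key a == v)) := by
  rw [PySem.List.sorted_eq_foldl_insertBy]
  induction xs using List.reverseRecOn with
  | nil => simp
  | append_singleton xs x ih =>
    rw [List.foldl_append, List.foldl_cons, List.foldl_nil,
        ih (fun a ha => hmem a (by simp [ha]))]
    have hx : key x ∈ vs := hmem x (by simp)
    obtain ⟨vs₁, vs₂, rfl⟩ := List.append_of_mem hx
    rw [List.pairwise_append] at hvs
    obtain ⟨h₁, h₂, h₁₂⟩ := hvs
    rw [List.pairwise_cons] at h₂
    obtain ⟨hlt₂, h₂'⟩ := h₂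
    simp only [List.flatMap_append, List.flatMap_cons]
    set B1 := vs₁.flatMap (fun v => xs.filter (fun a => key a == v)) with hB1
    set Bv := xs.filter (fun a => key a == key x) with hBv
    set B2 := vs₂.flatMap (fun v => xs.filter (fun a => key a == v)) with hB2
    have hleft : ∀ y ∈ B1 ++ Bv, (fun a b => decide (key a < key b)) x y = false := by
      intro y hy
      simp only [hB1, hBv, List.mem_append, List.mem_flatMap, List.mem_filter] at hy
      rcases hy with ⟨v, hv, _, hkey⟩ | ⟨_, hkey⟩
      · have := h₁₂ v hv (key x) (by simp)
        have hk : key y = v := by simpa using hkey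
        simp only [decide_eq_false_iff_not, not_lt, hk]
        omega
      · have hk : key y = key x := by simpa using hkey
        simp [hk]
    have hmid : PySem.List.insertBy (fun a b => decide (key a < key b)) x B2 = x :: B2 := by
      cases hcase : B2 with
      | nil => rfl
      | cons h t =>
        have hh : h ∈ B2 := by rw [hcase]; simp
        simp only [hB2, List.mem_flatMap, List.mem_filter] at hh
        obtain ⟨v, hv, _, hkey⟩ := hh
        have hk : key h = v := by simpa using hkey
        refine pv_insertBy_cons _ _ _ _ ?_
        have := hlt₂ v hv
        simp only [decide_eq_true_eq, hk]
        omega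
    rw [show B1 ++ (Bv ++ B2) = (B1 ++ Bv) ++ B2 by simp,
        pv_insertBy_append _ _ _ _ hleft, hmid]
    have hfL : ∀ v ∈ vs₁, (xs ++ [x]).filter (fun a => key a == v) = xs.filter (fun a => key a == v) := by
      intro v hv
      rw [List.filter_append]
      have := h₁₂ v hv (key x) (by simp)
      simp only [List.filter_cons, List.filter_nil]
      have : (key x == v) = false := by simp; omega
      simp [this]
    have hfR : ∀ v ∈ vs₂, (xs ++ [x]).filter (fun a => key a == v) = xs.filter (fun a => key a == v) := by
      intro v hv
      rw [List.filter_append]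
      have := hlt₂ v hv
      simp only [List.filter_cons, List.filter_nil]
      have : (key x == v) = false := by simp; omega
      simp [this]
    have hfM : (xs ++ [x]).filter (fun a => key a == key x) = Bv ++ [x] := by
      rw [List.filter_append, hBv]
      simp
    rw [pv_flatMap_congr hfL, pv_flatMap_congr hfR, hfM, ← hB1, ← hB2]
    simp [List.append_assoc]

-- elements of a row have exactly the row's length
theorem pv_len_row (s : List Char) (k : Nat) (hk : k ≤ s.length) (g : List Char)
    (hg : g ∈ pvRow s k) : g.length = k := by
  simp only [pvRow, List.mem_map, List.mem_range] at hg
  obtain ⟨i, hi, rfl⟩ := hg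
  simp [List.length_take, List.length_drop]
  omega

-- the column-major list filtered to one length is that row
theorem pv_gsB_filter (s : List Char) (M k : Nat) (hM : M ≤ s.length)
    (h1 : 1 ≤ k) (hk : k < M) :
    (pvGsB s M).filter (fun g => g.length == k) = pvRow s k := by
  rw [pvGsB, pv_filter_flatMap]
  have hcol : ∀ i ∈ List.range s.length,
      (pvCol s M i).filter (fun g => g.length == k) =
      (if i < s.length - k + 1 then [(s.drop i).take k] else []) := by
    intro i hi
    rw [List.mem_range] at hi
    rw [pvCol, List.filter_map]
    have hcong : ∀ t ∈ List.range (min (M - 1) (s.length - i)),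
        ((fun g => g.length == k) ∘ (fun t => (s.drop i).take (t + 1))) t
          = decide (t = k - 1) := by
      intro t ht
      rw [List.mem_range] at ht
      simp only [Function.comp_apply, List.length_take, List.length_drop]
      have : min (t + 1) (s.length - i) = t + 1 := by omega
      rw [this]
      by_cases h : t = k - 1 <;> simp [h] <;> omega
    rw [List.filter_congr hcong]
    have : (List.range (min (M - 1) (s.length - i))).filter (fun t => decide (t = k - 1))
        = (List.range (min (M - 1) (s.length - i))).flatMap
            (fun j => if j = k - 1 then [j] else []) := by
      induction (List.range (min (M - 1) (s.length - i))) with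
      | nil => rfl
      | cons a l ihl =>
        simp only [List.filter_cons, List.flatMap_cons, ← ihl]
        by_cases h : a = k - 1 <;> simp [h]
    rw [this, pv_flatMap_single]
    by_cases h : k - 1 < min (M - 1) (s.length - i)
    · have h2 : i < s.length - k + 1 := by omega
      have h3 : k - 1 + 1 = k := by omega
      simp [h, h2, h3]
    · have h2 : ¬ i < s.length - k + 1 := by omega
      simp [h, h2]
  rw [pv_flatMap_congr hcol, pv_flatMap_if_lt]
  have : min (s.length - k + 1) s.length = s.length - k + 1 := by omega
  rw [this, pvRow]

-- the row-major list filtered to one length is that row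
theorem pv_gsA_filter (s : List Char) (M k : Nat) (hM : M ≤ s.length)
    (h1 : 1 ≤ k) (hk : k < M) :
    (pvGsA s M).filter (fun g => g.length == k) = pvRow s k := by
  rw [pvGsA, pv_filter_flatMap]
  have hrow : ∀ j ∈ List.range (M - 1),
      (pvRow s (j + 1)).filter (fun g => g.length == k)
        = (if j = k - 1 then pvRow s (j + 1) else []) := by
    intro j hj
    rw [List.mem_range] at hj
    by_cases h : j = k - 1
    · rw [if_pos h]
      apply List.filter_eq_self.mpr
      intro g hg
      have := pv_len_row s (j + 1) (by omega) g hg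
      simp [this]
      omega
    · rw [if_neg h]
      apply List.filter_eq_nil_iff.mpr
      intro g hg
      have := pv_len_row s (j + 1) (by omega) g hg
      simp [this]
      omega
  rw [pv_flatMap_congr hrow, pv_flatMap_single]
  have h2 : k - 1 < M - 1 := by omega
  have h3 : k - 1 + 1 = k := by omega
  simp [h2, h3]

-- dedup of the row-major list is the rows' dedups concatenated
theorem pv_ofList_gsA (s : List Char) (M : Nat) (hM : M ≤ s.length) :
    PySem.Set.ofList (pvGsA s M)
      = (List.range (M - 1)).flatMap (fun j => PySem.Set.ofList (pvRow s (j + 1))) := by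
  suffices h : ∀ m, m ≤ M - 1 →
      PySem.Set.ofList ((List.range m).flatMap (fun j => pvRow s (j + 1)))
        = (List.range m).flatMap (fun j => PySem.Set.ofList (pvRow s (j + 1))) by
    exact h (M - 1) le_rfl
  intro m hm
  induction m with
  | zero => rfl
  | succ m ih =>
    rw [List.range_succ, List.flatMap_append, List.flatMap_append,
        pv_ofList_append_disjoint, ih (by omega)]
    · simp
    · intro y hy
      simp only [List.flatMap_cons, List.flatMap_nil, List.append_nil] at hy
      have hy' : y.length = m + 1 := pv_len_row s (m + 1) (by omega) y hy
      intro hc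
      simp only [List.mem_flatMap, List.mem_range] at hc
      obtain ⟨j, hj, hmem⟩ := hc
      have := pv_len_row s (j + 1) (by omega) y hmem
      omega

-- the central order fact: sorting B's counter items by length gives A's counter items
theorem pv_main (s : List Char) (M : Nat) (hM : M ≤ s.length) :
    PySem.List.sorted (PySem.Dict.counter (pvGsB s M)).items (fun kv => (kv.1.length : Int))
      = (PySem.Dict.counter (pvGsA s M)).items := by
  rw [PySem.Dict.items_counter, PySem.Dict.items_counter]
  rw [pv_sorted_blocks (fun kv : List Char × Int => (kv.1.length : Int)) _
    ((List.range (M - 1)).map (fun j : Nat => ((j + 1 : Nat) : Int)))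
    (by
      refine List.Pairwise.map _ ?_ (List.pairwise_lt_range)
      intro a b hab
      exact_mod_cast by omega)
    (by
      intro a ha
      simp only [List.mem_map, PySem.Set.mem_ofList] at ha
      obtain ⟨g, hg, rfl⟩ := ha
      simp only [pvGsB, List.mem_flatMap, List.mem_range] at hg
      obtain ⟨i, hi, hgcol⟩ := hg
      simp only [pvCol, List.mem_map, List.mem_range] at hgcol
      obtain ⟨t, ht, rfl⟩ := hgcol
      simp only [List.mem_map, List.mem_range]
      refine ⟨t, by omega, ?_⟩
      simp [List.length_take, List.length_drop]
      omega)]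
  rw [pv_ofList_gsA s M hM, List.map_flatMap, List.flatMap_map]
  refine pv_flatMap_congr ?_
  intro j hj
  rw [List.mem_range] at hj
  rw [List.filter_map]
  have hpred : ((fun kv : List Char × Int => ((kv.1.length : Int)) == ((j + 1 : Nat) : Int)) ∘
      (fun g => (g, ((pvGsB s M).count g : Int)))) = (fun g : List Char => g.length == (j + 1)) := by
    funext g
    simp only [Function.comp_apply]
    by_cases h : g.length = j + 1
    · simp [h]
    · have hb1 : ((g.length : Int) == ((j + 1 : Nat) : Int)) = false := by
        simp only [beq_eq_false_iff_ne, ne_eq]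
        intro hc
        exact h (by exact_mod_cast hc)
      have hb2 : (g.length == j + 1) = false := by
        simp [h]
      rw [hb1, hb2]
  rw [hpred, ← pv_ofList_filter, pv_gsB_filter s M (j + 1) hM (by omega) (by omega)]
  refine List.map_congr_left ?_
  intro g hg
  have hgrow : g ∈ pvRow s (j + 1) := (PySem.Set.mem_ofList _ _).mp hg
  have hlen : g.length = j + 1 := pv_len_row s (j + 1) (by omega) g hgrow
  have hcntB : (pvGsB s M).count g = (pvRow s (j + 1)).count g := by
    rw [← pv_gsB_filter s M (j + 1) hM (by omega) (by omega)]
    rw [List.count_filter (by simp [hlen])]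
  have hcntA : (pvGsA s M).count g = (pvRow s (j + 1)).count g := by
    rw [← pv_gsA_filter s M (j + 1) hM (by omega) (by omega)]
    rw [List.count_filter (by simp [hlen])]
  rw [hcntB, hcntA]

theorem pv_foldl_rows {α : Type} (l : List α) (G : α → List (List Char))
    (d : PySem.Dict (List Char) Int) :
    l.foldl (fun c x => (G x).foldl pvStepB c) d = (l.flatMap G).foldl pvStepB d := by
  induction l generalizing d with
  | nil => rfl
  | cons x l ih => rw [List.foldl_cons, List.flatMap_cons, List.foldl_append, ih]

-- A's row-major pass counts exactly the row-major gram list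
theorem pv_cA (s : List Char) (ml : Int) :
    (PySem.List.pyRange 1 (min ml (s.length : Int)) 1).foldl (fun c k =>
      (PySem.List.pyRange 0 ((s.length : Int) - k + 1) 1).foldl (fun c i =>
        pvStepB c (PySem.List.slice s (some i) (some (i + k)))) c) PySem.Dict.empty
    = PySem.Dict.counter (pvGsA s (min ml (s.length : Int)).toNat) := by
  set L := min ml (s.length : Int) with hL
  have hLle : L ≤ (s.length : Int) := min_le_right _ _
  rw [pv_pyRange_eq_map 1 L, List.foldl_map]
  have hM : (L - 1).toNat = L.toNat - 1 := by omega
  rw [hM]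
  have hinner : ∀ (c : PySem.Dict (List Char) Int), ∀ j ∈ List.range (L.toNat - 1),
      (PySem.List.pyRange 0 ((s.length : Int) - (1 + (j : Int)) + 1) 1).foldl (fun c i =>
        pvStepB c (PySem.List.slice s (some i) (some (i + (1 + (j : Int)))))) c
      = (pvRow s (j + 1)).foldl pvStepB c := by
    intro c j hj
    rw [List.mem_range] at hj
    have hcast : (s.length : Int) - (1 + (j : Int)) + 1 = ((s.length - (j + 1) + 1 : Nat) : Int) := by
      push_cast
      omega
    rw [hcast, PySem.List.pyRange_zero_natCast, List.foldl_map, pvRow, List.foldl_map]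
    refine PySem.List.foldl_congr_mem _ _ _ _ ?_
    intro acc i hi
    rw [List.mem_range] at hi
    have h1 : (i : Int) + (1 + (j : Int)) = ((i : Int)) + ((j + 1 : Nat) : Int) := by push_cast; ring
    rw [h1, PySem.List.slice_natCast_add]
  rw [PySem.List.foldl_congr_mem _ _ _ _ hinner, pv_foldl_rows, ← pvGsA]
  exact PySem.Dict.foldl_insert_getD_add_one_eq_counter _

-- B's character-growing pass counts exactly the column-major gram list
theorem pv_counts (s : List Char) (ml : Int) :
    (PySem.List.pyRange 0 (s.length : Int) 1).foldl (fun counts i =>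
      ((PySem.List.slice s (some i) (some (i + (max (min ml (s.length : Int)) 1) - 1))).foldl
        (fun (p : PySem.Dict (List Char) Int × List Char) c =>
          (p.1.insert (p.2 ++ [c]) (p.1.getD (p.2 ++ [c]) 0 + 1), p.2 ++ [c])) (counts, [])).1)
      PySem.Dict.empty
    = PySem.Dict.counter (pvGsB s (min ml (s.length : Int)).toNat) := by
  set L := min ml (s.length : Int) with hL
  set M := L.toNat with hMdef
  have hLle : L ≤ (s.length : Int) := min_le_right _ _
  rw [PySem.List.pyRange_zero_natCast, List.foldl_map]
  have hbody : ∀ (c : PySem.Dict (List Char) Int), ∀ i ∈ List.range s.length,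
      ((PySem.List.slice s (some (i : Int)) (some ((i : Int) + (max L 1) - 1))).foldl
        (fun (p : PySem.Dict (List Char) Int × List Char) ch =>
          (p.1.insert (p.2 ++ [ch]) (p.1.getD (p.2 ++ [ch]) 0 + 1), p.2 ++ [ch])) (c, [])).1
      = (pvCol s M i).foldl pvStepB c := by
    intro c i hi
    rw [List.mem_range] at hi
    have h1 : (i : Int) + (max L 1) - 1 = ((i : Int)) + ((M - 1 : Nat) : Int) := by
      omega
    rw [h1, PySem.List.slice_natCast_add, pv_foldl_inner]
    have hlen : ((s.drop i).take (M - 1)).length = min (M - 1) (s.length - i) := by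
      simp [List.length_take, List.length_drop]
    dsimp only
    refine congrArg (fun l => List.foldl pvStepB c l) ?_
    rw [pvCol, hlen]
    refine List.map_congr_left ?_
    intro t ht
    rw [List.mem_range] at ht
    rw [List.nil_append, List.take_take]
    congr 1
    omega
  rw [PySem.List.foldl_congr_mem _ _ _ _ hbody, pv_foldl_rows, ← pvGsB]
  exact PySem.Dict.foldl_insert_getD_add_one_eq_counter _

-- ===== VERDICT (by name: the statement is the Claim_ definition above) =====
theorem generate_ngrams_of_codes_spec : Claim_equal_generate_ngrams_of_codes := by
  intro es ml _
  unfold Spec_generate_ngrams_of_codes generate_ngrams_of_codes generate_ngrams_of_codes_alt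
  have hMle : (min ml (es.toList.length : Int)).toNat ≤ es.toList.length := by omega
  -- A side
  have hA := pvOuter es.toList ml 1 PySem.Dict.empty
  refine Eq.trans (congrArg (fun d => d.items.map
    (fun p => (String.ofList p.1, p.2.items))) hA) ?_
  rw [pv_cA es.toList ml]
  -- B side
  dsimp only
  rw [pv_counts es.toList ml, pv_main es.toList _ hMle]
  simp only [pvWrap, List.map_map]
  rfl
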